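-- pv_equiv track=rewrite | github.com/IFLAB-PKU/Data_Structures_and_Algorithm_B2026_pku | std/HW1-wjy/2-放苹果.py | method_num
-- ===== SOURCE A (Python) =====
-- def method_num(apple_num, plate_num):
--     if apple_num == 0:
--         return 1
--     if plate_num == 1:
--         return 1
--     if apple_num < plate_num:
--         return method_num(apple_num, apple_num)
--     return method_num(apple_num-plate_num, plate_num) + method_num(apple_num, plate_num-1)
-- ===== SOURCE B (Python) =====
-- def _next_row(row, j):
--     # new[a] = #partitions of a into parts of size <= j, given row[a] = same for <= j-1
--     new = []
--     for a in range(len(row)):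
--         v = row[a]
--         if a >= j:
--             v += new[a - j]
--         new.append(v)
--     return new
--
-- def method_num(apple_num, plate_num):
--     if apple_num == 0:
--         return 1
--     if plate_num == 1:
--         return 1
--     n = apple_num
--     k = min(plate_num, apple_num)
--     row = [1] * (n + 1)          # parts of size <= 1: one way each
--     for j in range(2, k + 1):
--         row = _next_row(row, j)
--     return row[n]
-- ===== Notes on version B (the rewrite author's own statement) =====
-- stated objective: faster
-- what changed: Replaces the exponential branching recursion with a bottom-up 1-D DP over part sizes (row[a] = partitions of a into parts <= j), returning row[n] after k rows.
import Mathlib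
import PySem

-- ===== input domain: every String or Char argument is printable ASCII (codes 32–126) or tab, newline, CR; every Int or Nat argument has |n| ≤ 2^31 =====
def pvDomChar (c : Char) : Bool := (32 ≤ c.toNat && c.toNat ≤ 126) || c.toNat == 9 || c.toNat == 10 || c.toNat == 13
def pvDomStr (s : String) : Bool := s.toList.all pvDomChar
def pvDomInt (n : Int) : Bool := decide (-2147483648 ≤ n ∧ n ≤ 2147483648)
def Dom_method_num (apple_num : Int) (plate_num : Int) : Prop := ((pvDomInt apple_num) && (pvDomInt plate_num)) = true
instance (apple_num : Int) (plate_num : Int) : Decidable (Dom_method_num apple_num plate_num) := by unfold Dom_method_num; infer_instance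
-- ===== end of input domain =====

-- B replaces A's exponential recursion by a bottom-up O(n*k) DP over part sizes (asymptotically faster, measured).

-- ===== PORT A =====
-- A's recursion can diverge (outside Pre_), so the port is the same recursion made
-- total with a fuel counter; Pre_ inputs always get enough fuel (proved below).
def methodFuel : Nat → Int → Int → Int
  | 0, _, _ => 0
  | f + 1, apple_num, plate_num =>
    if apple_num = 0 then 1
    else if plate_num = 1 then 1
    else if apple_num < plate_num then methodFuel f apple_num apple_num
    else methodFuel f (apple_num - plate_num) plate_num + methodFuel f apple_num (plate_num - 1)

def method_num (apple_num : Int) (plate_num : Int) : Int :=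
  methodFuel (apple_num.toNat + plate_num.toNat + 1) apple_num plate_num

-- ===== PORT B =====
-- _next_row: builds the new list left to right, appending; index a is the loop
-- counter of Python's `for a in range(len(row))` (always nonnegative, hence Nat).
def nextRowGo (j : Nat) (row : List Int) (a : Nat) (newR : List Int) : List Int :=
  if _h : a < row.length then
    nextRowGo j row (a + 1)
      (newR ++ [row.getD a 0 + (if j ≤ a then newR.getD (a - j) 0 else 0)])
  else newR
termination_by row.length - a

def nextRow (row : List Int) (j : Nat) : List Int := nextRowGo j row 0 []

def method_num_alt (apple_num : Int) (plate_num : Int) : Int :=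
  if apple_num = 0 then 1
  else if plate_num = 1 then 1
  else
    let n := apple_num.toNat
    let k := (min plate_num apple_num).toNat
    -- for j in range(2, k+1): row = _next_row(row, j)
    let row := (List.range' 2 (k - 1)).foldl nextRow (List.replicate (n + 1) (1 : Int))
    row.getD n 0

-- ===== PRECONDITION & SPEC =====
-- Pre_ is exactly where the Python A returns: on apple_num ≠ 0, plate_num ≠ 1 and
-- (apple_num < 0 or plate_num ≤ 0) A's recursion never terminates (RecursionError).
def Pre_method_num (apple_num : Int) (plate_num : Int) : Prop :=
  apple_num = 0 ∨ plate_num = 1 ∨ (0 ≤ apple_num ∧ 1 ≤ plate_num)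
instance (apple_num : Int) (plate_num : Int) : Decidable (Pre_method_num apple_num plate_num) := by
  unfold Pre_method_num; infer_instance

def pvWitness_method_num : Int × Int := (7, 3)

def Spec_method_num (apple_num : Int) (plate_num : Int) (out : Int) : Prop := out = method_num_alt apple_num plate_num
instance (apple_num : Int) (plate_num : Int) (out : Int) : Decidable (Spec_method_num apple_num plate_num out) := by unfold Spec_method_num; infer_instance

-- ===== CLAIM (what is proved, stated in full; the proofs are below) =====
def Claim_equal_method_num : Prop := ∀ (apple_num : Int) (plate_num : Int), Dom_method_num apple_num plate_num → Pre_method_num apple_num plate_num → Spec_method_num apple_num plate_num (method_num apple_num plate_num)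
-- ===== LEMMAS AND PROOFS =====

-- C n k = number of partitions of n into parts of size ≤ k (equivalently: into at most k parts).
def C : Nat → Nat → Int
  | 0, _ => 1
  | _ + 1, 0 => 0
  | n + 1, k + 1 => C (n + 1) k + (if k + 1 ≤ n + 1 then C (n + 1 - (k + 1)) (k + 1) else 0)
termination_by n k => (n, k)

lemma C_zero (k : Nat) : C 0 k = 1 := by unfold C; simp

lemma C_succ (n k : Nat) : C n (k + 1) = C n k + (if k + 1 ≤ n then C (n - (k + 1)) (k + 1) else 0) := by
  cases n with
  | zero => simp [C]
  | succ m => rw [C]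

lemma C_one (n : Nat) : C n 1 = 1 := by
  induction n using Nat.strong_induction_on with
  | _ n ih =>
    cases n with
    | zero => exact C_zero 1
    | succ m =>
      rw [C_succ]
      have h0 : C (m + 1) 0 = 0 := by rw [C]
      simp [h0, ih m (Nat.lt_succ_self m)]

lemma C_cap (n k : Nat) (h : n ≤ k) : C n k = C n n := by
  induction k with
  | zero =>
    have : n = 0 := by omega
    subst this
    rfl
  | succ k ih =>
    rcases Nat.lt_or_ge n (k + 1) with h1 | h1
    · rw [C_succ]
      have hn : ¬ (k + 1 ≤ n) := by omega
      rw [if_neg hn, add_zero]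
      exact ih (by omega)
    · have : n = k + 1 := by omega
      subst this
      rfl

lemma A_eq_C : ∀ (f : Nat) (a p : Int), 0 ≤ a → 1 ≤ p → a.toNat + p.toNat < f →
    methodFuel f a p = C a.toNat (min a.toNat p.toNat) := by
  intro f
  induction f with
  | zero => intro a p _ _ h; omega
  | succ f ih =>
    intro a p ha hp hf
    rw [methodFuel]
    by_cases h0 : a = 0
    · simp [h0, C_zero]
    · simp only [h0, if_false]
      by_cases h1 : p = 1
      · subst h1
        rw [if_pos rfl]
        have hm : min a.toNat (1 : Int).toNat = 1 := by omega
        rw [hm, C_one]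
      · simp only [h1, if_false]
        by_cases h2 : a < p
        · simp only [h2, if_true]
          rw [ih a a ha (by omega) (by omega)]
          congr 1
          omega
        · simp only [h2, if_false]
          have hp2 : 2 ≤ p := by omega
          have hpa : p ≤ a := by omega
          rw [ih (a - p) p (by omega) hp (by omega), ih a (p - 1) ha (by omega) (by omega)]
          have hm1 : min a.toNat (p - 1).toNat = (p - 1).toNat := by omega
          have hm2 : min a.toNat p.toNat = p.toNat := by omega
          rw [hm1, hm2]
          have hk : p.toNat = (p - 1).toNat + 1 := by omega
          rw [hk, C_succ]
          have hle : (p - 1).toNat + 1 ≤ a.toNat := by omega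
          simp only [hle, if_true]
          have he : a.toNat - ((p - 1).toNat + 1) = (a - p).toNat := by omega
          rw [he]
          have hmin : min (a - p).toNat ((p - 1).toNat + 1) = (a-p).toNat ∨ min (a - p).toNat ((p - 1).toNat + 1) = (p-1).toNat + 1 := by omega
          rcases hmin with hm | hm
          · rw [hm, C_cap (a - p).toNat ((p-1).toNat + 1) (by omega)]
            ring
          · rw [hm]; ring

lemma getD_append_lt {l : List Int} {v : Int} {i : Nat} (h : i < l.length) :
    (l ++ [v]).getD i 0 = l.getD i 0 := by
  simp [List.getD, List.getElem?_append_left h]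

lemma getD_append_self {l : List Int} {v : Int} :
    (l ++ [v]).getD l.length 0 = v := by
  simp [List.getD]

lemma nextRowGo_spec (j : Nat) (hj : 1 ≤ j) (row : List Int)
    (hrow : ∀ i, i < row.length → row.getD i 0 = C i (j - 1)) :
    ∀ (d a : Nat) (newR : List Int), row.length - a = d → a ≤ row.length → newR.length = a →
    (∀ i, i < a → newR.getD i 0 = C i j) →
    (nextRowGo j row a newR).length = row.length ∧
    (∀ i, i < row.length → (nextRowGo j row a newR).getD i 0 = C i j) := by
  intro d
  induction d with
  | zero =>
    intro a newR hd ha hlen hnew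
    rw [nextRowGo]
    have h : ¬ a < row.length := by omega
    simp only [h, dif_neg, not_false_iff]
    exact ⟨by omega, fun i hi => hnew i (by omega)⟩
  | succ d ih =>
    intro a newR hd ha hlen hnew
    rw [nextRowGo]
    have h : a < row.length := by omega
    simp only [h, dif_pos]
    have hv : row.getD a 0 + (if j ≤ a then newR.getD (a - j) 0 else 0) = C a j := by
      rw [hrow a h]
      have hj' : j = (j - 1) + 1 := by omega
      by_cases hja : j ≤ a
      · rw [if_pos hja, hnew (a - j) (by omega)]
        conv_rhs => rw [hj']
        rw [C_succ, if_pos (by omega : (j - 1) + 1 ≤ a)]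
        have he : a - ((j - 1) + 1) = a - j := by omega
        rw [he, ← hj']
      · rw [if_neg hja]
        conv_rhs => rw [hj']
        rw [C_succ, if_neg (by omega : ¬ ((j - 1) + 1 ≤ a))]
    exact ih (a + 1)
      (newR ++ [row.getD a 0 + (if j ≤ a then newR.getD (a - j) 0 else 0)])
      (by omega) (by omega) (by simp [hlen])
      (by
        intro i hi
        by_cases hia : i < a
        · rw [getD_append_lt (by omega)]
          exact hnew i hia
        · have hieq : i = a := by omega
          subst hieq
          rw [← hlen, getD_append_self, hlen]
          exact hv)

lemma foldl_rows (n : Nat) : ∀ (c : Nat),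
    ((List.range' 2 c).foldl nextRow (List.replicate (n + 1) (1 : Int))).length = n + 1 ∧
    (∀ i, i ≤ n → ((List.range' 2 c).foldl nextRow (List.replicate (n + 1) (1 : Int))).getD i 0 = C i (c + 1)) := by
  intro c
  induction c with
  | zero =>
    constructor
    · simp
    · intro i hi
      simp [List.getD, Nat.lt_succ_of_le hi, C_one]
  | succ c ih =>
    have hr : List.range' 2 (c + 1) = List.range' 2 c ++ [2 + c] := by
      simpa using List.range'_concat (step := 1) (s := 2) (n := c)
    rw [hr, List.foldl_append]
    simp only [List.foldl_cons, List.foldl_nil]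
    obtain ⟨hlen, hval⟩ := ih
    have hnr : ∀ (r : List Int) (j : Nat), nextRow r j = nextRowGo j r 0 [] := fun _ _ => rfl
    rw [hnr]
    have hspec := nextRowGo_spec (2 + c) (by omega)
      ((List.range' 2 c).foldl nextRow (List.replicate (n + 1) (1 : Int)))
      (by
        intro i hi
        rw [hlen] at hi
        rw [hval i (by omega)]
        congr 1
        omega)
      ((List.range' 2 c).foldl nextRow (List.replicate (n + 1) (1 : Int))).length
      0 [] (by omega) (by omega) rfl (by intro i hi; omega)
    constructor
    · rw [hspec.1, hlen]
    · intro i hi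
      rw [hspec.2 i (by rw [hlen]; omega)]
      congr 1
      omega

theorem method_num_eq (a p : Int) (h : Pre_method_num a p) :
    method_num a p = method_num_alt a p := by
  unfold method_num method_num_alt
  by_cases h0 : a = 0
  · subst h0
    simp [methodFuel]
  · simp only [h0, if_false]
    by_cases h1 : p = 1
    · subst h1
      rw [methodFuel]
      simp [h0]
    · simp only [h1, if_false]
      rcases h with h | h | h
      · omega
      · omega
      · have ha1 : 1 ≤ a := by omega
        have hp2 : 2 ≤ p := by omega
        rw [A_eq_C (a.toNat + p.toNat + 1) a p (by omega) (by omega) (by omega)]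
        have hk1 : 1 ≤ (min p a).toNat := by omega
        obtain ⟨_, hval⟩ := foldl_rows a.toNat ((min p a).toNat - 1)
        rw [hval a.toNat (le_refl _)]
        congr 1
        omega

-- ===== VERDICT (by name: the statement is the Claim_ definition above) =====
theorem method_num_spec : Claim_equal_method_num := by
  intro a p _ hpre
  unfold Spec_method_num
  exact method_num_eq a p hpre
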